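-- pv_equiv track=rewrite | github.com/bomi0320/baekjoon | 3085.py | compute_max_val
-- ===== SOURCE A (Python) =====
-- def compute_max_val(n, board):
--     max_val = 0
--     # 가로로 최대 개수 계산
--     max_tmp = 1
--     for i in range(n):
--         max_tmp = 1
--         for j in range(1, n):
--             if board[i][j-1] == board[i][j]:
--                 max_tmp += 1
--             else:
--                 if max_tmp > max_val:
--                     max_val = max_tmp
--                 max_tmp = 1
--         if max_tmp > max_val:
--             max_val = max_tmp
--     if max_tmp > max_val:
--         max_val = max_tmp
--
--
--     # 세로로 최대 개수 계산
--     max_tmp = 1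
--     for j in range(n):
--         max_tmp = 1
--         for i in range(1, n):
--             if board[i-1][j] == board[i][j]:
--                 max_tmp += 1
--             else:
--                 if max_tmp > max_val:
--                     max_val = max_tmp
--                 max_tmp = 1
--         if max_tmp > max_val:
--             max_val = max_tmp
--     if max_tmp > max_val:
--         max_val = max_tmp
--
--     return max_val
-- ===== SOURCE B (Python) =====
-- def _runs(line):
--     # run lengths of maximal blocks of equal adjacent elements, left to right
--     if not line:
--         return []
--     head = line[0]
--     i = 1
--     while i < len(line) and line[i] == head:
--         i += 1
--     return [i] + _runs(line[i:])
--
--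
-- def compute_max_val(n, board):
--     # first n rows, each cut to n cells; nothing to scan when n <= 0
--     # (a bare board[:n] would slice from the board's end for negative n)
--     rows = [row[:n] for row in board[:max(n, 0)]]
--     lines = rows + [list(col) for col in zip(*rows)]
--     best = 1
--     for line in lines:
--         for r in _runs(line):
--             best = max(best, r)
--     return best
-- ===== Notes on version B (the rewrite author's own statement) =====
-- stated objective: idiomatic
-- what changed: B slices the board to its n-by-n part, forms the rows plus the zip-transposed columns, and takes the max over explicit run-length groups produced by a recursive groupby-style helper, replacing A's four index loops with a counter-and-flush state machine.
import Mathlib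
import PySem

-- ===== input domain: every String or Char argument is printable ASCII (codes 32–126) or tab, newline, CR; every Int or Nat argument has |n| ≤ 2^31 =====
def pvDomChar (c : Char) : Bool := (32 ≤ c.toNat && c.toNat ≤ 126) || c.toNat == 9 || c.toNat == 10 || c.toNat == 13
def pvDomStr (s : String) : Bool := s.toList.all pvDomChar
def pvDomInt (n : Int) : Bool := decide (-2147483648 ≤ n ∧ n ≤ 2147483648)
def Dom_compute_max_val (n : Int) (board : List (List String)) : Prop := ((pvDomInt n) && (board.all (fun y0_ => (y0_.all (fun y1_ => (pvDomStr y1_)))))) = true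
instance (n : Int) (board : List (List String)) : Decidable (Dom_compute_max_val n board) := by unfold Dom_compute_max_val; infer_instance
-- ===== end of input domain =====

-- B replaces A's four index loops with a counter-and-flush state machine by slicing the board to its
-- n×n part, forming rows plus zip-transposed columns, and maxing over explicit run-length groups
-- computed by a recursive groupby-style helper (objective: idiomatic; same O(n^2) cost).


-- ===== PORT A =====
-- board[i][j], total form; exact on indices admitted by Pre_ (both in range)
def pvCell (board : List (List String)) (i j : Int) : String :=
  PySem.List.pyGetD (PySem.List.pyGetD board i []) j ""

def compute_max_val (n : Int) (board : List (List String)) : Int :=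
  let max_val : Int := 0
  let max_tmp : Int := 1
  -- horizontal loop: state (max_val, max_tmp)
  let sH :=
    (PySem.List.pyRange 0 n 1).foldl (fun (s : Int × Int) i =>
      let s1 :=
        (PySem.List.pyRange 1 n 1).foldl (fun (t : Int × Int) j =>
          if pvCell board i (j - 1) == pvCell board i j then (t.1, t.2 + 1)
          else (if t.2 > t.1 then t.2 else t.1, 1)) (s.1, 1)
      (if s1.2 > s1.1 then s1.2 else s1.1, s1.2)) (max_val, max_tmp)
  let max_val := if sH.2 > sH.1 then sH.2 else sH.1
  -- vertical loop
  let sV :=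
    (PySem.List.pyRange 0 n 1).foldl (fun (s : Int × Int) j =>
      let s1 :=
        (PySem.List.pyRange 1 n 1).foldl (fun (t : Int × Int) i =>
          if pvCell board (i - 1) j == pvCell board i j then (t.1, t.2 + 1)
          else (if t.2 > t.1 then t.2 else t.1, 1)) (s.1, 1)
      (if s1.2 > s1.1 then s1.2 else s1.1, s1.2)) (max_val, 1)
  if sV.2 > sV.1 then sV.2 else sV.1

-- ===== PORT B =====
-- the 'while i < len(line) and line[i] == head' loop of _runs: number of further leading cells equal to head
def pvLead (head : String) : List String → Nat
  | [] => 0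
  | y :: ys => if y == head then 1 + pvLead head ys else 0

-- _runs(line): run lengths of maximal blocks of equal adjacent elements
def pvRuns : List String → List Int
  | [] => []
  | x :: xs =>
    let i : Nat := 1 + pvLead x xs
    ((i : Nat) : Int) :: pvRuns ((x :: xs).drop i)
termination_by line => line.length
decreasing_by simp

def compute_max_val_alt (n : Int) (board : List (List String)) : Int :=
  let rows := (PySem.List.slice board none (some (max n 0))).map (fun row => PySem.List.slice row none (some n))
  -- zip(*rows) as lists: columns up to the shortest row (hand-ported, exact: zip stops at the shortest iterable)
  let m := ((rows.map List.length).min?).getD 0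
  let cols := (List.range m).map (fun k => rows.map (fun r => r.getD k ""))
  (rows ++ cols).foldl (fun best line => (pvRuns line).foldl (fun best r => max best r) best) 1

-- ===== PRECONDITION & SPEC =====
-- Pre_ excludes exactly the inputs on which A raises IndexError: n ≥ 2 with the board lacking
-- n rows of at least n cells each (for n ≤ 1 A touches no cell and always returns).
def Pre_compute_max_val (n : Int) (board : List (List String)) : Prop :=
  n ≤ 1 ∨ (n.toNat ≤ board.length ∧ ∀ row ∈ board.take n.toNat, n.toNat ≤ row.length)
instance (n : Int) (board : List (List String)) : Decidable (Pre_compute_max_val n board) := by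
  unfold Pre_compute_max_val; infer_instance

def pvWitness_compute_max_val : Int × List (List String) := (2, [["a", "b"], ["b", "b"]])

def Spec_compute_max_val (n : Int) (board : List (List String)) (out : Int) : Prop := out = compute_max_val_alt n board
instance (n : Int) (board : List (List String)) (out : Int) : Decidable (Spec_compute_max_val n board out) := by unfold Spec_compute_max_val; infer_instance

-- ===== CLAIM (what is proved, stated in full; the proofs are below) =====
def Claim_equal_compute_max_val : Prop := ∀ (n : Int) (board : List (List String)), Dom_compute_max_val n board → Pre_compute_max_val n board → Spec_compute_max_val n board (compute_max_val n board)

-- ===== LEMMAS AND PROOFS =====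

-- A's inner loop as a structural machine over the line, carrying the previous cell
def pvMach (s : Int × Int) (prev : String) : List String → Int × Int
  | [] => s
  | y :: ys =>
    pvMach (if prev == y then (s.1, s.2 + 1) else (if s.2 > s.1 then s.2 else s.1, 1)) y ys

-- A's 'if max_tmp > max_val then max_val = max_tmp' flush
def pvFin (s : Int × Int) : Int := if s.2 > s.1 then s.2 else s.1

-- per-line result of B's inner loop
def pvLineMax (mv : Int) (line : List String) : Int := (pvRuns line).foldl (fun b r => max b r) mv

theorem pvFin_ge (s : Int × Int) : s.2 ≤ pvFin s := by
  unfold pvFin; split <;> omega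

-- appending one cell to the machine's input
theorem pvMach_append (s : Int × Int) (x z : String) (ys : List String) :
    pvMach s x (ys ++ [z]) =
      (if (x :: ys).getD ys.length "" == z then ((pvMach s x ys).1, (pvMach s x ys).2 + 1)
       else (if (pvMach s x ys).2 > (pvMach s x ys).1 then (pvMach s x ys).2 else (pvMach s x ys).1, 1)) := by
  induction ys generalizing s x with
  | nil => simp [pvMach]
  | cons y ys ih =>
    simp only [pvMach, List.cons_append, List.length_cons, List.getD_cons_succ]
    exact ih _ _

-- A's index-based inner loop equals the structural machine
theorem pvInner_eq_mach (f : Int → String) (x : String) (xs : List String) (s : Int × Int)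
    (hf : ∀ k : Nat, k < xs.length + 1 → f (k : Int) = (x :: xs).getD k "") :
    (PySem.List.pyRange 1 ((x :: xs).length : Int) 1).foldl (fun (t : Int × Int) j =>
        if f (j - 1) == f j then (t.1, t.2 + 1)
        else (if t.2 > t.1 then t.2 else t.1, 1)) s = pvMach s x xs := by
  induction xs using List.reverseRecOn with
  | nil => simp [pvMach]
  | append_singleton ys z ih =>
    have hlen : (((x :: (ys ++ [z])).length : Nat) : Int) = ((x :: ys).length : Int) + 1 := by
      simp
    rw [hlen, PySem.List.pyRange_one_succ_right (by exact_mod_cast List.length_pos_of_ne_nil (by simp)), List.foldl_append]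
    have hys : ∀ k : Nat, k < ys.length + 1 → f (k : Int) = (x :: ys).getD k "" := by
      intro k hk
      rw [hf k (by simp; omega)]
      have : (x :: (ys ++ [z])) = (x :: ys) ++ [z] := by simp
      rw [this, List.getD, List.getElem?_append_left (by simpa using hk)]
      rfl
    rw [ih hys, pvMach_append]
    have h1 : f (((x :: ys).length : Int) - 1) = (x :: ys).getD ys.length "" := by
      have : (((x :: ys).length : Int) - 1) = ((ys.length : Nat) : Int) := by simp
      rw [this, hf ys.length (by simp)]
      have : (x :: (ys ++ [z])) = (x :: ys) ++ [z] := by simp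
      rw [this, List.getD, List.getElem?_append_left (by simp), List.getD]
    have h2 : f ((x :: ys).length : Int) = z := by
      have : (((x :: ys).length : Nat) : Int) = ((ys.length + 1 : Nat) : Int) := by simp
      rw [this, hf (ys.length + 1) (by simp)]
      have : (x :: (ys ++ [z])) = (x :: ys) ++ [z] := by simp
      rw [this]
      have : (x :: ys).length = ys.length + 1 := by simp
      rw [← this]
      simp [List.getD]
    simp only [List.foldl_cons, List.foldl_nil, h1, h2]

-- the machine flushed equals the fold of run lengths
theorem pvMach_runs (xs : List String) (x : String) (mv t : Int) :
    pvFin (pvMach (mv, t) x xs) =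
      (pvRuns (xs.drop (pvLead x xs))).foldl (fun b r => max b r)
        (max mv (t + (pvLead x xs : Int))) := by
  induction xs generalizing x mv t with
  | nil => simp [pvMach, pvLead, pvRuns, pvFin]; omega
  | cons y ys ih =>
    by_cases h : x = y
    · subst h
      simp only [pvMach, pvLead, beq_self_eq_true, if_true]
      rw [show (1 + pvLead x ys) = pvLead x ys + 1 from Nat.add_comm _ _, List.drop_succ_cons, ih]
      congr 1
      push_cast
      omega
    · have hne : (x == y) = false := by simp [h]
      have hne' : (y == x) = false := by simp [Ne.symm h]
      simp only [pvMach, pvLead, hne, hne', Bool.false_eq_true, if_false, List.drop_zero,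
        Nat.cast_zero, add_zero]
      rw [ih, pvRuns]
      simp only [List.foldl_cons]
      rw [show (1 + pvLead y ys) = pvLead y ys + 1 from Nat.add_comm _ _, List.drop_succ_cons]
      congr 1
      push_cast
      omega

theorem pvMach_lineMax (xs : List String) (x : String) (mv : Int) :
    pvFin (pvMach (mv, 1) x xs) = pvLineMax mv (x :: xs) := by
  rw [pvMach_runs, pvLineMax, pvRuns]
  simp only [List.foldl_cons]
  rw [show (1 + pvLead x xs) = pvLead x xs + 1 from Nat.add_comm _ _, List.drop_succ_cons]
  congr 1
  push_cast
  omega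

-- A's outer loops: fold of pairs whose first component is the per-line max
theorem pvOuter (l : List Int) (F : Int × Int → Int → Int × Int) (lm : Int → Int → Int)
    (s0 : Int × Int)
    (hF : ∀ s i, i ∈ l → (F s i).1 = lm s.1 i ∧ (F s i).2 ≤ (F s i).1)
    (hl : l ≠ []) :
    (l.foldl F s0).1 = l.foldl lm s0.1 ∧ (l.foldl F s0).2 ≤ (l.foldl F s0).1 := by
  induction l generalizing s0 with
  | nil => exact absurd rfl hl
  | cons i l ih =>
    rcases l with _ | ⟨i2, l⟩
    · simpa using hF s0 i (by simp)
    · have h1 := hF s0 i (by simp)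
      have h2 := ih (F s0 i) (fun s j hj => hF s j (List.mem_cons_of_mem _ hj)) (by simp)
      constructor
      · show ((i2 :: l).foldl F (F s0 i)).1 = (i2 :: l).foldl lm (lm s0.1 i)
        rw [← h1.1]
        exact h2.1
      · exact h2.2

-- fold over range-of-indices is fold over the list
theorem pvFoldIdx {α β : Type} (rs : List α) (d : α) (F : β → α → β) (b : β) :
    (List.range rs.length).foldl (fun s k => F s (rs.getD k d)) b = rs.foldl F b := by
  induction rs using List.reverseRecOn generalizing b with
  | nil => simp
  | append_singleton rs a ih =>
    rw [List.length_append, List.length_cons, List.length_nil, Nat.add_zero, List.range_succ,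
      List.foldl_append, List.foldl_append]
    have h1 : (List.range rs.length).foldl (fun s k => F s ((rs ++ [a]).getD k d)) b
        = (List.range rs.length).foldl (fun s k => F s (rs.getD k d)) b := by
      apply PySem.List.foldl_congr_mem
      intro acc k hk
      rw [List.mem_range] at hk
      rw [List.getD, List.getElem?_append_left hk]
      rfl
    rw [h1, ih]
    simp [List.getD]

theorem pvLineMax_one_zero (x : String) (xs : List String) :
    pvLineMax 0 (x :: xs) = pvLineMax 1 (x :: xs) := by
  simp only [pvLineMax, pvRuns, List.foldl_cons]
  congr 1
  omega


-- A's loop bodies, named for the proofs (definitionally the lambdas inside compute_max_val)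
def pvBodyH (board : List (List String)) (n : Int) (s : Int × Int) (i : Int) : Int × Int :=
  let s1 :=
    (PySem.List.pyRange 1 n 1).foldl (fun (t : Int × Int) j =>
      if pvCell board i (j - 1) == pvCell board i j then (t.1, t.2 + 1)
      else (if t.2 > t.1 then t.2 else t.1, 1)) (s.1, 1)
  (if s1.2 > s1.1 then s1.2 else s1.1, s1.2)

def pvBodyV (board : List (List String)) (n : Int) (s : Int × Int) (j : Int) : Int × Int :=
  let s1 :=
    (PySem.List.pyRange 1 n 1).foldl (fun (t : Int × Int) i =>
      if pvCell board (i - 1) j == pvCell board i j then (t.1, t.2 + 1)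
      else (if t.2 > t.1 then t.2 else t.1, 1)) (s.1, 1)
  (if s1.2 > s1.1 then s1.2 else s1.1, s1.2)

-- the n×n sub-board and its columns, as B builds them
def pvRows (n : Int) (board : List (List String)) : List (List String) :=
  (board.take n.toNat).map (fun row => row.take n.toNat)

def pvCols (n : Int) (board : List (List String)) : List (List String) :=
  (List.range n.toNat).map (fun k => (pvRows n board).map (fun r => r.getD k ""))

theorem pvFin_of_le (s : Int × Int) (h : s.2 ≤ s.1) : pvFin s = s.1 := by
  unfold pvFin; split <;> omega

theorem pvGetD_take {α : Type} (l : List α) (N k : Nat) (d : α) (h : k < N) :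
    (l.take N).getD k d = l.getD k d := by
  simp [List.getD, h]

theorem pvGetD_map {α β : Type} (l : List α) (f : α → β) (k : Nat) (d : β) (d' : α)
    (h : k < l.length) : (l.map f).getD k d = f (l.getD k d') := by
  rw [List.getD_eq_getElem _ _ (by simpa), List.getElem_map, List.getD_eq_getElem _ _ h]

theorem pvMinConst (l : List Nat) (c : Nat) (h : l ≠ []) (hc : ∀ a ∈ l, a = c) :
    l.min?.getD 0 = c := by
  have hm : l.min? = some c := by
    rw [List.min?_eq_some_iff]
    rcases l with _ | ⟨a, l⟩
    · exact absurd rfl h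
    · refine ⟨?_, fun b hb => le_of_eq (hc b hb).symm⟩
      have := hc a (by simp)
      simp [← this]
  rw [hm]; rfl

theorem pvSmall (lines : List (List String)) (b : Int) (hb : 1 ≤ b)
    (h : ∀ line ∈ lines, line.length ≤ 1) :
    lines.foldl (fun best line => (pvRuns line).foldl (fun best r => max best r) best) b = b := by
  induction lines generalizing b with
  | nil => rfl
  | cons line rest ih =>
    have h1 : (pvRuns line).foldl (fun best r => max best r) b = b := by
      have hl := h line (by simp)
      match line with
      | [] => simp [pvRuns]
      | [x] => simp [pvRuns, pvLead]; omega
      | x :: y :: t => simp at hl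
    rw [List.foldl_cons, h1]
    exact ih b hb (fun l hl => h l (by simp [hl]))

theorem pvRows_length (n : Int) (board : List (List String)) (h1 : n.toNat ≤ board.length) :
    (pvRows n board).length = n.toNat := by
  simp [pvRows]; omega

theorem pvRows_getD (n : Int) (board : List (List String)) (k : Nat) (hk : k < n.toNat)
    (h1 : n.toNat ≤ board.length) :
    (pvRows n board).getD k [] = (board.getD k []).take n.toNat := by
  unfold pvRows
  rw [pvGetD_map _ _ _ _ [] (by simp [List.length_take]; omega), pvGetD_take _ _ _ _ hk]

theorem pvRowLen (n : Int) (board : List (List String)) (k : Nat) (hk : k < n.toNat)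
    (h1 : n.toNat ≤ board.length)
    (h2 : ∀ row ∈ board.take n.toNat, n.toNat ≤ row.length) :
    ((pvRows n board).getD k []).length = n.toNat := by
  rw [pvRows_getD n board k hk h1, List.length_take]
  have hmem : board.getD k [] ∈ board.take n.toNat := by
    rw [← pvGetD_take board n.toNat k [] hk,
      List.getD_eq_getElem _ _ (by simp [List.length_take]; omega)]
    exact List.getElem_mem _
  exact min_eq_left (h2 _ hmem)

theorem pvRows_line (n : Int) (board : List (List String)) (k : Nat) (hk : k < n.toNat)
    (hN2 : 1 ≤ n.toNat) (h1 : n.toNat ≤ board.length)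
    (h2 : ∀ row ∈ board.take n.toNat, n.toNat ≤ row.length) :
    ∃ x xs, (pvRows n board).getD k [] = x :: xs ∧ (x :: xs).length = n.toNat := by
  have hL := pvRowLen n board k hk h1 h2
  rcases hgd : (pvRows n board).getD k [] with _ | ⟨x, xs⟩
  · rw [hgd] at hL; simp at hL; omega
  · exact ⟨x, xs, rfl, by rw [← hgd]; exact hL⟩

theorem pvCols_length (n : Int) (board : List (List String)) :
    (pvCols n board).length = n.toNat := by
  simp [pvCols]

theorem pvCols_getD (n : Int) (board : List (List String)) (k : Nat) (hk : k < n.toNat) :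
    (pvCols n board).getD k [] = (pvRows n board).map (fun r => r.getD k "") := by
  unfold pvCols
  rw [pvGetD_map _ _ _ _ 0 (by simp only [List.length_range]; exact hk),
    List.getD_eq_getElem _ _ (by simp only [List.length_range]; exact hk), List.getElem_range]

theorem pvCellH (n : Int) (board : List (List String)) (i : Int) (kk : Nat)
    (hi0 : 0 ≤ i) (hiN : i.toNat < n.toNat) (hkk : kk < n.toNat)
    (h1 : n.toNat ≤ board.length) :
    pvCell board i (kk : Int) = ((pvRows n board).getD i.toNat []).getD kk "" := by
  unfold pvCell
  conv_lhs => rw [← Int.toNat_of_nonneg hi0]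
  simp only [PySem.List.pyGetD_natCast]
  rw [pvRows_getD n board i.toNat hiN h1, pvGetD_take _ _ _ _ hkk]

theorem pvCellV (n : Int) (board : List (List String)) (j : Int) (kk : Nat)
    (hj0 : 0 ≤ j) (hjN : j.toNat < n.toNat) (hkk : kk < n.toNat)
    (h1 : n.toNat ≤ board.length) :
    pvCell board (kk : Int) j = ((pvCols n board).getD j.toNat []).getD kk "" := by
  unfold pvCell
  conv_lhs => rw [← Int.toNat_of_nonneg hj0]
  simp only [PySem.List.pyGetD_natCast]
  rw [pvCols_getD n board j.toNat hjN,
    pvGetD_map _ _ _ _ [] (by rw [pvRows_length n board h1]; exact hkk),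
    pvRows_getD n board kk hkk h1, pvGetD_take _ _ _ _ hjN]

theorem pvBodyH_eq (n : Int) (board : List (List String))
    (h1 : n.toNat ≤ board.length)
    (h2 : ∀ row ∈ board.take n.toNat, n.toNat ≤ row.length)
    (hn0 : 0 ≤ n) (hN1 : 1 ≤ n.toNat) (s : Int × Int) (i : Int) (hi : 0 ≤ i ∧ i < n) :
    (pvBodyH board n s i).1 = pvLineMax s.1 ((pvRows n board).getD i.toNat []) ∧
      (pvBodyH board n s i).2 ≤ (pvBodyH board n s i).1 := by
  have hiN : i.toNat < n.toNat := by omega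
  obtain ⟨x, xs, hxx, hlen⟩ := pvRows_line n board i.toNat hiN hN1 h1 h2
  have hinner :
      (PySem.List.pyRange 1 n 1).foldl (fun (t : Int × Int) j =>
        if pvCell board i (j - 1) == pvCell board i j then (t.1, t.2 + 1)
        else (if t.2 > t.1 then t.2 else t.1, 1)) (s.1, 1) = pvMach (s.1, 1) x xs := by
    have hn_eq : n = ((x :: xs).length : Int) := by rw [hlen]; omega
    rw [hn_eq]
    apply pvInner_eq_mach
    intro kk hkk
    rw [← hxx]
    exact pvCellH n board i kk hi.1 hiN (by rw [List.length_cons] at hlen; omega) h1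
  constructor
  · unfold pvBodyH
    dsimp only
    rw [hinner, hxx]
    exact pvMach_lineMax xs x s.1
  · unfold pvBodyH
    dsimp only
    exact pvFin_ge _

theorem pvBodyV_eq (n : Int) (board : List (List String))
    (h1 : n.toNat ≤ board.length)
    (_h2 : ∀ row ∈ board.take n.toNat, n.toNat ≤ row.length)
    (hn0 : 0 ≤ n) (hN1 : 1 ≤ n.toNat) (s : Int × Int) (j : Int) (hj : 0 ≤ j ∧ j < n) :
    (pvBodyV board n s j).1 = pvLineMax s.1 ((pvCols n board).getD j.toNat []) ∧
      (pvBodyV board n s j).2 ≤ (pvBodyV board n s j).1 := by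
  have hjN : j.toNat < n.toNat := by omega
  have hcol : (pvCols n board).getD j.toNat [] = (pvRows n board).map (fun r => r.getD j.toNat "") :=
    pvCols_getD n board j.toNat hjN
  have hclen : ((pvCols n board).getD j.toNat []).length = n.toNat := by
    rw [hcol, List.length_map, pvRows_length n board h1]
  obtain ⟨x, xs, hxx, hlen⟩ : ∃ x xs, (pvCols n board).getD j.toNat [] = x :: xs ∧
      (x :: xs).length = n.toNat := by
    rcases hgd : (pvCols n board).getD j.toNat [] with _ | ⟨x, xs⟩
    · rw [hgd] at hclen; simp at hclen; omega
    · exact ⟨x, xs, rfl, by rw [← hgd]; exact hclen⟩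
  have hinner :
      (PySem.List.pyRange 1 n 1).foldl (fun (t : Int × Int) i =>
        if pvCell board (i - 1) j == pvCell board i j then (t.1, t.2 + 1)
        else (if t.2 > t.1 then t.2 else t.1, 1)) (s.1, 1) = pvMach (s.1, 1) x xs := by
    have hn_eq : n = ((x :: xs).length : Int) := by rw [hlen]; omega
    rw [hn_eq]
    refine pvInner_eq_mach (fun i => pvCell board i j) x xs (s.1, 1) ?_
    intro kk hkk
    rw [← hxx]
    exact pvCellV n board j kk hj.1 hjN (by rw [List.length_cons] at hlen; omega) h1
  constructor
  · unfold pvBodyV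
    dsimp only
    rw [hinner, hxx]
    exact pvMach_lineMax xs x s.1
  · unfold pvBodyV
    dsimp only
    exact pvFin_ge _

theorem pvFoldRange (rs : List (List String)) (b : Int) (lmf : Int → List String → Int) :
    (PySem.List.pyRange 0 (rs.length : Int) 1).foldl (fun s i => lmf s (rs.getD i.toNat [])) b =
      rs.foldl lmf b := by
  rw [PySem.List.pyRange_zero_natCast, List.foldl_map]
  have h : (fun (s : Int) (k : Nat) => lmf s (rs.getD ((k : Int)).toNat [])) =
      (fun s k => lmf s (rs.getD k [])) := by
    funext s k; simp
  rw [h, pvFoldIdx]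

-- ===== VERDICT (by name: the statement is the Claim_ definition above) =====
theorem compute_max_val_spec : Claim_equal_compute_max_val := by
  intro n board _ hpre
  unfold Spec_compute_max_val
  by_cases hn1 : n ≤ 1
  · rcases show n ≤ 0 ∨ 0 < n from by omega with hn0' | hpos
    · -- n ≤ 0: both loops of A are empty, and B scans no rows
      have hempty : PySem.List.pyRange 0 n 1 = [] := by
        rw [PySem.List.pyRange_one]
        rw [show (n - 0).toNat = 0 from by omega]
        rfl
      have hA : compute_max_val n board = 1 := by
        rw [show compute_max_val n board =
          pvFin ((PySem.List.pyRange 0 n 1).foldl (pvBodyV board n)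
            (pvFin ((PySem.List.pyRange 0 n 1).foldl (pvBodyH board n) (0, 1)), 1)) from rfl,
          hempty]
        simp [pvFin]
      have hB : compute_max_val_alt n board = 1 := by
        unfold compute_max_val_alt
        rw [show max n 0 = 0 from by omega, PySem.List.slice_to _ (le_refl 0)]
        simp
      rw [hA, hB]
    · have hone : n = 1 := by omega
      subst hone
      have hA : compute_max_val 1 board = 1 := rfl
      have hB : compute_max_val_alt 1 board = 1 := by
        unfold compute_max_val_alt
        rw [show max (1:Int) 0 = 1 from rfl]
        simp only [PySem.List.slice_to _ (by norm_num : (0:Int) ≤ 1)]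
        apply pvSmall _ _ (le_refl 1)
        intro line hl
        rcases List.mem_append.mp hl with hl | hl
        · obtain ⟨row, hrow, rfl⟩ := List.mem_map.mp hl
          simp only [List.length_take]
          omega
        · obtain ⟨k, hk, rfl⟩ := List.mem_map.mp hl
          simp only [List.length_map, List.length_take]
          omega
      rw [hA, hB]
  · -- n ≥ 2
    have hn0 : (0:Int) ≤ n := by omega
    have hshape := hpre.resolve_left hn1
    have h1 : n.toNat ≤ board.length := hshape.1
    have h2 := hshape.2
    have hN1 : 1 ≤ n.toNat := by omega
    -- A's value
    have e1 : compute_max_val n board =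
        pvFin ((PySem.List.pyRange 0 n 1).foldl (pvBodyV board n)
          (pvFin ((PySem.List.pyRange 0 n 1).foldl (pvBodyH board n) (0, 1)), 1)) := rfl
    have hne : PySem.List.pyRange 0 n 1 ≠ [] := by
      have h0 : (0:Int) ∈ PySem.List.pyRange 0 n 1 :=
        PySem.List.mem_pyRange_one.mpr ⟨le_refl _, by omega⟩
      intro hnil
      rw [hnil] at h0
      simp at h0
    have hH := pvOuter (PySem.List.pyRange 0 n 1) (pvBodyH board n)
        (fun mv i => pvLineMax mv ((pvRows n board).getD i.toNat [])) (0, 1)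
        (fun s i hi => pvBodyH_eq n board h1 h2 hn0 hN1 s i
          (PySem.List.mem_pyRange_one.mp hi)) hne
    have hfinH : pvFin ((PySem.List.pyRange 0 n 1).foldl (pvBodyH board n) (0, 1)) =
        (PySem.List.pyRange 0 n 1).foldl
          (fun mv i => pvLineMax mv ((pvRows n board).getD i.toNat [])) 0 := by
      rw [pvFin_of_le _ hH.2, hH.1]
    have hV := pvOuter (PySem.List.pyRange 0 n 1) (pvBodyV board n)
        (fun mv j => pvLineMax mv ((pvCols n board).getD j.toNat []))
        (pvFin ((PySem.List.pyRange 0 n 1).foldl (pvBodyH board n) (0, 1)), 1)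
        (fun s j hj => pvBodyV_eq n board h1 h2 hn0 hN1 s j
          (PySem.List.mem_pyRange_one.mp hj)) hne
    have hnr : ((pvRows n board).length : Int) = n := by rw [pvRows_length n board h1]; omega
    have hnc : ((pvCols n board).length : Int) = n := by rw [pvCols_length n board]; omega
    have hA : compute_max_val n board =
        (pvCols n board).foldl pvLineMax ((pvRows n board).foldl pvLineMax 0) := by
      rw [e1, pvFin_of_le _ hV.2, hV.1, hfinH]
      rw [show (PySem.List.pyRange 0 n 1) = (PySem.List.pyRange 0 ((pvRows n board).length : Int) 1) from by rw [hnr]]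
      rw [pvFoldRange (pvRows n board) 0 pvLineMax]
      rw [show (PySem.List.pyRange 0 ((pvRows n board).length : Int) 1) = (PySem.List.pyRange 0 ((pvCols n board).length : Int) 1) from by rw [hnr, hnc]]
      rw [pvFoldRange (pvCols n board) _ pvLineMax]
    -- B's value
    have hm : (((board.take n.toNat).map (fun row => row.take n.toNat)).map List.length).min?.getD 0
        = n.toNat := by
      apply pvMinConst
      · intro hnil
        have h0 := congrArg List.length hnil
        simp only [List.length_map, List.length_take, List.length_nil] at h0
        omega
      · intro a ha
        obtain ⟨row, hrow, rfl⟩ := List.mem_map.mp ha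
        obtain ⟨row', hrow', rfl⟩ := List.mem_map.mp hrow
        rw [List.length_take]
        exact min_eq_left (h2 row' hrow')
    have hB : compute_max_val_alt n board =
        (pvCols n board).foldl pvLineMax ((pvRows n board).foldl pvLineMax 1) := by
      unfold compute_max_val_alt
      rw [show max n 0 = n from max_eq_left hn0]
      simp only [PySem.List.slice_to _ hn0]
      rw [hm, List.foldl_append]
      rfl
    -- bridge: starting value 0 (A) vs 1 (B) is absorbed by the first (nonempty) line
    have hrows_ne : pvRows n board ≠ [] := by
      intro hnil
      have := pvRows_length n board h1
      rw [hnil] at this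
      simp at this
      omega
    obtain ⟨r0, rest, hr⟩ := List.exists_cons_of_ne_nil hrows_ne
    obtain ⟨x, xs, hxx, _⟩ := pvRows_line n board 0 (by omega) hN1 h1 h2
    rw [hr, List.getD_cons_zero] at hxx
    rw [hA, hB, hr, List.foldl_cons, List.foldl_cons, hxx, pvLineMax_one_zero]
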